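-- pv_equiv track=rewrite | github.com/mug31416/PubAdmin-Discourse | src/SEGmodel/commonForModeling.py | flattenListExtended
-- ===== SOURCE A (Python) =====
-- def flattenListExtended(listOfLists):
--   elems = []
--   posTuple = []
--   sec = 0
--   for sublist in listOfLists:
--     idx = 0
--     for e in sublist:
--       elems.append(e)
--       posTuple.append((sec,idx))
--       idx = idx +1
--     sec = sec + 1
--
--   return elems, posTuple
-- ===== SOURCE B (Python) =====
-- def flattenListExtended(listOfLists):
--   # pass 1: flatten, recording cumulative section offsets
--   elems = []
--   offsets = [0]
--   for sub in listOfLists: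
--     elems += sub
--     offsets.append(len(elems))
--   # pass 2: recover each position arithmetically from its global index
--   posTuple = []
--   sec = 0
--   for k in range(len(elems)):
--     while offsets[sec + 1] <= k:
--       sec += 1
--     posTuple.append((sec, k - offsets[sec]))
--   return elems, posTuple
-- ===== Notes on version B (the rewrite author's own statement) =====
-- stated objective: alternative
-- what changed: Instead of A's single interleaved nested loop with sec/idx counters, B flattens once while recording cumulative section offsets, then recovers each (section, index) position arithmetically from the global element index by walking the offsets table.
import Mathlib
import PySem

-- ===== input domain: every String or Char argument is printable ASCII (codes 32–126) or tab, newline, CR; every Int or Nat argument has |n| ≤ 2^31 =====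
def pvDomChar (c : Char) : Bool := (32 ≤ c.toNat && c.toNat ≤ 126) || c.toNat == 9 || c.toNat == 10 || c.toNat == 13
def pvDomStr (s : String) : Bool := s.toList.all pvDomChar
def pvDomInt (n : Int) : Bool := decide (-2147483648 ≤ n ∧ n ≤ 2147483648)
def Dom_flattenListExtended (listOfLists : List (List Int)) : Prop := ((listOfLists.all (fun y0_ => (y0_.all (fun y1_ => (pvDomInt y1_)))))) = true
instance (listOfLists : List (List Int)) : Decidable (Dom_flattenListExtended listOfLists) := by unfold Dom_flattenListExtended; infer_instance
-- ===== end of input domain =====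

-- B flattens once while recording cumulative section offsets, then recovers each (section, index)
-- position arithmetically from the global element index via the offsets table (alternative algorithm).


-- ===== PORT A =====
-- A: one interleaved loop; state = (elems, posTuple, sec); inner loop carries idx.
-- body of A's outer loop, extracted as a helper
def flattenStepA (st : List Int × List (Int × Int) × Int) (sublist : List Int) :
    List Int × List (Int × Int) × Int :=
  let inner := sublist.foldl
    (fun (t : List Int × List (Int × Int) × Int) e =>
      (t.1 ++ [e], t.2.1 ++ [(st.2.2, t.2.2)], t.2.2 + 1))
    (st.1, st.2.1, 0)
  (inner.1, inner.2.1, st.2.2 + 1)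

def flattenListExtended (listOfLists : List (List Int)) : List Int × (List (Int × Int)) :=
  let st := listOfLists.foldl flattenStepA ([], [], 0)
  (st.1, st.2.1)

-- ===== PORT B =====
-- B's inner `while offsets[sec+1] <= k: sec += 1`; fuel = offsets.length is enough because the
-- Python loop always stops while sec+1 is in range (the last offset exceeds every k of the range),
-- so the out-of-range default (k+1, which stops the loop) is never reached on executed states.
def pvAdv (offsets : List Int) (k : Int) : Nat → Nat → Nat
  | 0, sec => sec
  | fuel + 1, sec =>
    if offsets.getD (sec + 1) (k + 1) ≤ k then pvAdv offsets k fuel (sec + 1) else sec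

-- body of B's second loop: advance sec past finished sections, append (sec, k - offsets[sec])
def pvStep (offsets : List Int) (t : Nat × List (Int × Int)) (k : Int) : Nat × List (Int × Int) :=
  let sec := pvAdv offsets k offsets.length t.1
  (sec, t.2 ++ [((sec : Int), k - offsets.getD sec 0)])

def flattenListExtended_alt (listOfLists : List (List Int)) : List Int × (List (Int × Int)) :=
  -- pass 1: flatten, recording cumulative section offsets
  let p1 := listOfLists.foldl
    (fun (t : List Int × List Int) sub =>
      let es := t.1 ++ sub
      (es, t.2 ++ [(es.length : Int)]))
    ([], [(0 : Int)])
  let elems := p1.1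
  let offsets := p1.2
  -- pass 2: recover each position arithmetically from its global index
  let p2 := (PySem.List.pyRange 0 (elems.length : Int) 1).foldl (pvStep offsets) (0, [])
  (elems, p2.2)

-- ===== PRECONDITION & SPEC =====
def Spec_flattenListExtended (listOfLists : List (List Int)) (out : List Int × (List (Int × Int))) : Prop := out = flattenListExtended_alt listOfLists
instance (listOfLists : List (List Int)) (out : List Int × (List (Int × Int))) : Decidable (Spec_flattenListExtended listOfLists out) := by unfold Spec_flattenListExtended; infer_instance

-- ===== CLAIM (what is proved, stated in full; the proofs are below) =====
def Claim_equal_flattenListExtended : Prop := ∀ (listOfLists : List (List Int)), Dom_flattenListExtended listOfLists → Spec_flattenListExtended listOfLists (flattenListExtended listOfLists)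

-- ===== LEMMAS AND PROOFS =====

-- canonical position block: pvCanon s j c = [(s,j), (s,j+1), …, (s,j+c-1)]
def pvCanon (s j : Int) : Nat → List (Int × Int)
  | 0 => []
  | c + 1 => (s, j) :: pvCanon s (j + 1) c

-- canonical position list for all sections from section number s
def pvPos (s : Int) : List (List Int) → List (Int × Int)
  | [] => []
  | x :: xs => pvCanon s 0 x.length ++ pvPos (s + 1) xs

-- cumulative-offset tails: pvSums b l = [b+|l0|, b+|l0|+|l1|, …]
def pvSums : Nat → List (List Int) → List Int
  | _, [] => []
  | b, x :: xs => ((b + x.length : Nat) : Int) :: pvSums (b + x.length) xs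

theorem pvSums_length (b : Nat) (l : List (List Int)) : (pvSums b l).length = l.length := by
  induction l generalizing b with
  | nil => rfl
  | cons x xs ih => simp [pvSums, ih]

-- ----- A-side: the interleaved loop computes (flatten, pvPos) -----

theorem flatten_inner (sub : List Int) (sec : Int) (es : List Int)
    (ps : List (Int × Int)) (idx : Int) :
    sub.foldl
      (fun (t : List Int × List (Int × Int) × Int) e =>
        (t.1 ++ [e], t.2.1 ++ [(sec, t.2.2)], t.2.2 + 1)) (es, ps, idx)
    = (es ++ sub, ps ++ pvCanon sec idx sub.length, idx + sub.length) := by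
  induction sub generalizing es ps idx with
  | nil => simp [pvCanon]
  | cons x xs ih =>
    rw [List.foldl_cons, ih]
    refine Prod.ext (by simp) (Prod.ext ?_ ?_)
    · simp [pvCanon]
    · simp only [List.length_cons]
      push_cast
      ring

theorem flattenStepA_eq (es : List Int) (ps : List (Int × Int)) (sec : Int)
    (sub : List Int) :
    flattenStepA (es, ps, sec) sub
    = (es ++ sub, ps ++ pvCanon sec 0 sub.length, sec + 1) := by
  simp [flattenStepA, flatten_inner]

theorem flatten_outer (l : List (List Int)) (es : List Int)
    (ps : List (Int × Int)) (sec : Int) :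
    l.foldl flattenStepA (es, ps, sec)
    = (es ++ l.flatten, ps ++ pvPos sec l, sec + l.length) := by
  induction l generalizing es ps sec with
  | nil => simp [pvPos]
  | cons x xs ih =>
    rw [List.foldl_cons, flattenStepA_eq, ih]
    refine Prod.ext (by simp) (Prod.ext ?_ ?_)
    · simp [pvPos]
    · simp only [List.length_cons]
      push_cast
      ring

-- ----- B-side pass 1: flatten + offsets -----

theorem pass1 (l : List (List Int)) (es : List Int) (offs : List Int) :
    l.foldl
      (fun (t : List Int × List Int) sub =>
        let es := t.1 ++ sub
        (es, t.2 ++ [(es.length : Int)])) (es, offs)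
    = (es ++ l.flatten, offs ++ pvSums es.length l) := by
  induction l generalizing es offs with
  | nil => simp [pvSums]
  | cons x xs ih =>
    rw [List.foldl_cons]
    simp only []
    rw [ih]
    simp [pvSums, List.length_append, List.append_assoc]

-- list getD helpers
theorem getD_append_left {α : Type} [Inhabited α] (pre rest : List α) (j : Nat) (d : α)
    (h : j < pre.length) : (pre ++ rest).getD j d = pre.getD j d := by
  simp [List.getD_eq_getElem?_getD, List.getElem?_append_left h]

theorem getD_append_len {α : Type} [Inhabited α] (pre rest : List α) (d : α) :
    (pre ++ rest).getD pre.length d = rest.getD 0 d := by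
  simp [List.getD_eq_getElem?_getD, List.getElem?_append_right (Nat.le_refl pre.length)]

theorem getD_in_range {α : Type} [Inhabited α] (l : List α) (j : Nat) (d d' : α)
    (h : j < l.length) : l.getD j d = l.getD j d' := by
  simp [List.getD_eq_getElem?_getD, List.getElem?_eq_getElem h]

-- the while loop lands exactly on the section s whose interval contains k
theorem pvAdv_eq (O : List Int) (k : Int) (s : Nat) :
    ∀ (fuel r : Nat), r ≤ s → s + 1 ≤ fuel + r → s + 1 < O.length →
      (∀ j, r < j → j ≤ s → O.getD j 0 ≤ k) → k < O.getD (s + 1) 0 →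
      pvAdv O k fuel r = s := by
  intro fuel
  induction fuel with
  | zero => intro r h1 h2 _ _ _; omega
  | succ f ih =>
    intro r h1 h2 hlen hmid hstop
    rcases Nat.lt_or_ge r s with hr | hr
    · have hcond : O.getD (r + 1) (k + 1) ≤ k := by
        rw [getD_in_range O (r + 1) (k + 1) 0 (by omega)]
        exact hmid (r + 1) (by omega) (by omega)
      rw [pvAdv, if_pos hcond]
      exact ih (r + 1) (by omega) (by omega) hlen (fun j hj1 hj2 => hmid j (by omega) hj2) hstop
    · have hrs : r = s := by omega
      subst hrs
      have hcond : ¬ O.getD (r + 1) (k + 1) ≤ k := by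
        rw [getD_in_range O (r + 1) (k + 1) 0 (by omega)]
        omega
      rw [pvAdv, if_neg hcond]

-- one section's worth of loop iterations: sec settles on s, idx counts from k0 - b
theorem inner_fold (O : List Int) (s : Nat) (b : Int) (c : Nat) :
    ∀ (k0 : Int) (r : Nat) (acc : List (Int × Int)),
      O.getD s 0 = b → s + 1 < O.length → r ≤ s →
      (∀ j, r < j → j ≤ s → O.getD j 0 ≤ k0) →
      b ≤ k0 → k0 + c ≤ O.getD (s + 1) 0 →
      (PySem.List.pyRange k0 (k0 + c) 1).foldl (pvStep O) (r, acc)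
        = if c = 0 then (r, acc) else (s, acc ++ pvCanon (s : Int) (k0 - b) c) := by
  induction c with
  | zero =>
    intro k0 r acc _ _ _ _ _ _
    simp [PySem.List.pyRange_one_eq_nil (le_refl k0)]
  | succ c ih =>
    intro k0 r acc hb hlen hr hmid hbk hstop
    have hlt : k0 < k0 + ((c : Int) + 1) := by omega
    rw [if_neg (Nat.succ_ne_zero c)]
    have hcast : (((c : Nat) + 1 : Nat) : Int) = (c : Int) + 1 := by push_cast; ring
    rw [hcast, PySem.List.pyRange_one_cons hlt, List.foldl_cons]
    have hadv : pvAdv O k0 O.length r = s := by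
      apply pvAdv_eq O k0 s O.length r hr (by omega) hlen hmid
      omega
    have hstep : pvStep O (r, acc) k0 = (s, acc ++ [((s : Int), k0 - b)]) := by
      simp only [pvStep, hadv]
      rw [hb]
    rw [hstep]
    have hrange : k0 + ((c : Int) + 1) = (k0 + 1) + (c : Int) := by ring
    rw [hrange]
    rw [ih (k0 + 1) s (acc ++ [((s : Int), k0 - b)]) hb hlen (le_refl s)
      (fun j hj1 hj2 => absurd (lt_of_lt_of_le hj1 hj2) (lt_irrefl s)) (by omega) (by omega)]
    by_cases hc : c = 0
    · subst hc; simp [pvCanon]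
    · rw [if_neg hc]
      have : k0 + 1 - b = (k0 - b) + 1 := by ring
      simp [this, pvCanon, List.append_assoc]

-- the whole second pass over one decomposition point of the offsets table
theorem outer_fold (l : List (List Int)) :
    ∀ (pre O : List Int) (b r : Nat) (acc : List (Int × Int)),
      O = pre ++ ((b : Int) :: pvSums b l) →
      (∀ v ∈ pre, v ≤ (b : Int)) → r ≤ pre.length →
      ∃ r', (PySem.List.pyRange (b : Int) ((b : Int) + l.flatten.length) 1).foldl (pvStep O) (r, acc)
              = (r', acc ++ pvPos (pre.length : Int) l) ∧ r' ≤ pre.length + l.length := by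
  induction l with
  | nil =>
    intro pre O b r acc _ _ hr
    refine ⟨r, ?_, by omega⟩
    have h0 : ((([] : List (List Int)).flatten.length : Nat) : Int) = 0 := by simp
    rw [h0]
    simp [pvPos]
  | cons x xs ih =>
    intro pre O b r acc hO hpre hr
    have hOlen : O.length = pre.length + 2 + xs.length := by
      simp [hO, pvSums, pvSums_length]; omega
    have hb : O.getD pre.length 0 = (b : Int) := by
      rw [hO, getD_append_len]; rfl
    have hnext : O.getD (pre.length + 1) 0 = ((b + x.length : Nat) : Int) := by
      have : pre ++ ((b : Int) :: pvSums b (x :: xs))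
          = (pre ++ [(b : Int)]) ++ pvSums b (x :: xs) := by simp
      rw [hO, this]
      have hlen1 : (pre ++ [(b : Int)]).length = pre.length + 1 := by simp
      rw [← hlen1, getD_append_len]
      simp [pvSums]
    have hmid : ∀ j, r < j → j ≤ pre.length → O.getD j 0 ≤ (b : Int) := by
      intro j _ hj2
      rcases Nat.lt_or_ge j pre.length with hj | hj
      · rw [hO, getD_append_left _ _ _ _ hj]
        rw [List.getD_eq_getElem _ _ hj]
        exact hpre _ (List.getElem_mem hj)
      · have : j = pre.length := by omega
        rw [this, hb]
    -- split the k-range at the end of section x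
    have hsplit : PySem.List.pyRange (b : Int) ((b : Int) + (x :: xs).flatten.length) 1
        = PySem.List.pyRange (b : Int) ((b : Int) + x.length) 1
          ++ PySem.List.pyRange ((b : Int) + x.length) ((b : Int) + (x :: xs).flatten.length) 1 := by
      apply PySem.List.pyRange_one_append
      · simp
      · have hfl : (x :: xs).flatten.length = x.length + xs.flatten.length := by simp
        rw [hfl]; push_cast; omega
    rw [hsplit, List.foldl_append]
    have hfirst := inner_fold O pre.length (b : Int) x.length (b : Int) r acc hb
      (by omega) hr hmid (le_refl _) (by rw [hnext]; push_cast; omega)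
    -- first component after section x: r if x was empty, else pre.length; both ≤ pre.length
    have hsec : ∃ r0, (PySem.List.pyRange (b : Int) ((b : Int) + x.length) 1).foldl (pvStep O) (r, acc)
        = (r0, acc ++ pvCanon (pre.length : Int) 0 x.length) ∧ r0 ≤ pre.length := by
      by_cases hx : x.length = 0
      · exact ⟨r, by rw [hfirst, if_pos hx, hx]; simp [pvCanon], hr⟩
      · exact ⟨pre.length, by rw [hfirst, if_neg hx]; simp, le_refl _⟩
    obtain ⟨r0, hfold1, hr0⟩ := hsec
    rw [hfold1]
    have hO' : O = (pre ++ [(b : Int)]) ++ (((b + x.length : Nat) : Int) :: pvSums (b + x.length) xs) := by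
      rw [hO]; simp [pvSums]
    have hpre' : ∀ v ∈ pre ++ [(b : Int)], v ≤ ((b + x.length : Nat) : Int) := by
      intro v hv
      rcases List.mem_append.mp hv with h | h
      · have := hpre v h; push_cast; omega
      · simp at h; subst h; push_cast; omega
    obtain ⟨r', hfold2, hr'⟩ := ih (pre ++ [(b : Int)]) O (b + x.length) r0
      (acc ++ pvCanon (pre.length : Int) 0 x.length) hO' hpre' (by simp; omega)
    have hbound : ((b + x.length : Nat) : Int) = (b : Int) + x.length := by push_cast; ring
    rw [hbound] at hfold2
    rw [show (b : Int) + (x.length : Int) + (xs.flatten.length : Int)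
          = (b : Int) + ((x :: xs).flatten.length : Int) by
        simp [List.flatten_cons]; ring] at hfold2
    rw [hfold2]
    refine ⟨r', ?_, by simp at hr' ⊢; omega⟩
    simp [pvPos, List.append_assoc]

-- ===== VERDICT (by name: the statement is the Claim_ definition above) =====
theorem flattenListExtended_spec : Claim_equal_flattenListExtended := by
  intro l _
  unfold Spec_flattenListExtended flattenListExtended flattenListExtended_alt
  simp only [flatten_outer, List.nil_append]
  rw [pass1]
  simp only [List.nil_append, List.length_nil]
  simp only [List.singleton_append]
  obtain ⟨r', hfold, _⟩ := outer_fold l [] ((0 : Int) :: pvSums 0 l) 0 0 [] (by simp) (by simp) (le_refl 0)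
  simp only [List.length_nil, Nat.cast_zero, List.nil_append, zero_add] at hfold
  rw [hfold]
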